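-- pv_equiv track=rewrite | github.com/fdileta/gitlab-dbt-project | extract/saas_usage_ping/transform_postgres_to_snowflake.py | get_trimmed_token
-- ===== SOURCE A (Python) =====
-- from typing import Any, Dict, List, Callable
--
-- def get_trimmed_token(token: List[str]) -> List[str]:
--     """
--     Remove empty spaces from the end
--     """
--     if not token:
--         return []
--
--     res = token
--
--     for char in res[::-1]:
--         if char == " ":
--             res.pop()
--         else:
--             break
--
--     return res
-- ===== SOURCE B (Python) =====
-- from typing import List
--
-- def get_trimmed_token(token: List[str]) -> List[str]:
--     """
--     Remove empty spaces from the end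
--     """
--     if not token:
--         return []
--
--     i = len(token)
--     while i > 0 and token[i - 1] == " ":
--         i -= 1
--
--     del token[i:]
--     return token
-- ===== Notes on version B (the rewrite author's own statement) =====
-- stated objective: simpler
-- what changed: Replaced the iterate-over-a-reversed-copy loop that pops one trailing element per step with a backward boundary-index scan followed by a single bulk suffix deletion (del token[i:]).
import Mathlib
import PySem

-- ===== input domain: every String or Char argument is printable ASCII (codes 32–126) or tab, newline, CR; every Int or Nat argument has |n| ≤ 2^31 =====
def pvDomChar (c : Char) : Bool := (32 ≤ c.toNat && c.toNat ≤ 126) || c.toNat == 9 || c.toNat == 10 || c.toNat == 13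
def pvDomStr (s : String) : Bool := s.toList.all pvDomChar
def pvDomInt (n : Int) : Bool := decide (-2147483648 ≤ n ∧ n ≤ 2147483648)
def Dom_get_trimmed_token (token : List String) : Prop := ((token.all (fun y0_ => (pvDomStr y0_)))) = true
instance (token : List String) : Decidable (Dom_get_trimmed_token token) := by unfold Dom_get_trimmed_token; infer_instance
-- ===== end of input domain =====

-- B replaces A's pop-one-per-step loop over a reversed copy with a boundary-index scan plus one
-- bulk suffix deletion (simpler decomposition, same cost). Both Pythons mutate the argument list
-- in place identically (A pops, B dels the same suffix); the theorem is about the return value.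


-- ===== PORT A =====
-- 'for char in res[::-1]: if char == " ": res.pop() else: break' — the reversed copy is taken
-- once (res[::-1] = res.reverse, PySem.List.slice?_none_none_neg_one), then each iteration
-- either pops the last element (dropLast; the returned element is discarded) or breaks.
def pvPopLoopA : List String → List String → List String
  | [], res => res
  | c :: rest, res => if c = " " then pvPopLoopA rest res.dropLast else res

def get_trimmed_token (token : List String) : List String :=
  if token = [] then []
  else
    let res := token
    pvPopLoopA res.reverse res

-- ===== PORT B =====
-- 'while i > 0 and token[i-1] == " ": i -= 1' — descending index scan; token[i-1] with
-- 0 < i ≤ len(token) is an in-range non-negative index (PySem.List.pyGetD).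
def pvCutB (token : List String) : Nat → Nat
  | 0 => 0
  | i + 1 => if PySem.List.pyGetD token ((i : Nat) : Int) "" = " " then pvCutB token i else i + 1

-- 'del token[i:]; return token' — the returned list is the prefix token[:i].
def get_trimmed_token_alt (token : List String) : List String :=
  if token = [] then []
  else token.take (pvCutB token token.length)

-- ===== PRECONDITION & SPEC =====
def Spec_get_trimmed_token (token : List String) (out : List String) : Prop := out = get_trimmed_token_alt token
instance (token : List String) (out : List String) : Decidable (Spec_get_trimmed_token token out) := by unfold Spec_get_trimmed_token; infer_instance

-- ===== CLAIM (what is proved, stated in full; the proofs are below) =====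
def Claim_equal_get_trimmed_token : Prop := ∀ (token : List String), Dom_get_trimmed_token token → Spec_get_trimmed_token token (get_trimmed_token token)

-- ===== LEMMAS AND PROOFS =====

-- A's loop, run on rev.reverse with the reversed copy rev, drops the leading " "-run of rev.
theorem pvPopLoopA_eq_dropWhile (rev : List String) :
    pvPopLoopA rev rev.reverse = (rev.dropWhile (fun s => s = " ")).reverse := by
  induction rev with
  | nil => simp [pvPopLoopA]
  | cons c rest ih =>
    by_cases hc : c = " "
    · simpa [pvPopLoopA, hc, List.dropLast_concat] using ih
    · simp [pvPopLoopA, hc]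

theorem pvCutB_le (token : List String) (i : Nat) : pvCutB token i ≤ i := by
  induction i with
  | zero => simp [pvCutB]
  | succ n ih =>
    simp only [pvCutB]
    split
    · omega
    · omega

-- The scan only inspects indices below i, so a suffix element does not matter.
theorem pvCutB_append (xs : List String) (x : String) (i : Nat) (h : i ≤ xs.length) :
    pvCutB (xs ++ [x]) i = pvCutB xs i := by
  induction i with
  | zero => simp [pvCutB]
  | succ n ih =>
    have hn : n < xs.length := by omega
    have hget : PySem.List.pyGetD (xs ++ [x]) ((n : Nat) : Int) "" =
        PySem.List.pyGetD xs ((n : Nat) : Int) "" := by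
      simp [PySem.List.pyGetD_natCast, List.getD, List.getElem?_append_left hn]
    simp only [pvCutB, hget, ih (by omega)]

-- B's prefix is the same "strip the trailing run of spaces" value.
theorem take_pvCutB_eq (token : List String) :
    token.take (pvCutB token token.length) =
      (token.reverse.dropWhile (fun s => s = " ")).reverse := by
  induction token using List.reverseRecOn with
  | nil => simp [pvCutB]
  | append_singleton xs x ih =>
    have hlen : (xs ++ [x]).length = xs.length + 1 := by simp
    have hget : PySem.List.pyGetD (xs ++ [x]) ((xs.length : Nat) : Int) "" = x := by
      simp [PySem.List.pyGetD_natCast, List.getD]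
    by_cases hx : x = " "
    · subst hx
      have hcut : pvCutB (xs ++ [" "]) (xs ++ [" "]).length = pvCutB xs xs.length := by
        rw [hlen]
        simp [pvCutB, hget, pvCutB_append xs " " xs.length le_rfl]
      have hle : pvCutB xs xs.length ≤ xs.length := pvCutB_le xs xs.length
      rw [hcut, List.take_append_of_le_length hle, ih]
      simp
    · have hcut : pvCutB (xs ++ [x]) (xs ++ [x]).length = xs.length + 1 := by
        rw [hlen]; simp only [pvCutB, hget]; simp [hx]
      rw [hcut, ← hlen, List.take_length]
      simp [hx]

-- ===== VERDICT (by name: the statement is the Claim_ definition above) =====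
theorem get_trimmed_token_spec : Claim_equal_get_trimmed_token := by
  intro token _
  show get_trimmed_token token = get_trimmed_token_alt token
  unfold get_trimmed_token get_trimmed_token_alt
  by_cases h : token = []
  · simp [h]
  · simp only [h]
    have hA := pvPopLoopA_eq_dropWhile token.reverse
    rw [List.reverse_reverse] at hA
    rw [hA, take_pvCutB_eq]
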